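-- pv_equiv track=rewrite | github.com/grafana/pyroscope | tools/syft-to-pyroscope-yaml/syft_to_pyroscope_yaml.py | _filter_nested_prefixes
-- ===== SOURCE A (Python) =====
-- from typing import Dict, List, Optional, Tuple
--
-- def _filter_nested_prefixes(prefixes: List[str]) -> List[str]:
--     """Remove prefixes where one is a strict prefix of another.
--
--     For example, if we have ['org/apache/tomcat', 'org/apache/tomcat/embed'],
--     we should only keep 'org/apache/tomcat/embed' (the more specific one).
--     """
--     if not prefixes:
--         return []
--
--     # Sort by length (longest first) to check more specific prefixes first
--     sorted_prefixes = sorted(prefixes, key=len, reverse=True)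
--     filtered = []
--
--     for prefix in sorted_prefixes:
--         # Check if this prefix is a strict prefix of any already added prefix
--         is_nested = False
--         for existing in filtered:
--             # Check if prefix is a strict prefix of existing
--             # (prefix must be shorter and existing must start with prefix + '/')
--             if len(prefix) < len(existing) and existing.startswith(prefix + "/"):
--                 is_nested = True
--                 break
--             # Check if existing is a strict prefix of prefix
--             if len(existing) < len(prefix) and prefix.startswith(existing + "/"):
--                 # Remove the less specific one and keep the more specific
--                 filtered.remove(existing)
--                 break
--
--         if not is_nested:
--             filtered.append(prefix)
--
--     return sorted(filtered)
-- ===== SOURCE B (Python) =====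
-- from typing import List
--
--
-- def _filter_nested_prefixes(prefixes: List[str]) -> List[str]:
--     """Remove prefixes where one is a strict path-prefix of another.
--
--     Builds, in one pass, the set of all strings that occur as a proper
--     '/'-terminated prefix of some element; an element is dropped exactly
--     when it is in that set.  No pairwise scan.
--     """
--     cut = set()
--     for q in prefixes:
--         for i, c in enumerate(q):
--             if c == "/":
--                 cut.add(q[:i])
--     return sorted(p for p in prefixes if p not in cut)
-- ===== Notes on version B (the rewrite author's own statement) =====
-- stated objective: faster
-- what changed: Replaces the quadratic pairwise scan (sort by length, compare each prefix against every kept one, with removal) by a single hash-set of all '/'-terminated proper prefixes, so each element is kept or dropped by one set lookup.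
import Mathlib
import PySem

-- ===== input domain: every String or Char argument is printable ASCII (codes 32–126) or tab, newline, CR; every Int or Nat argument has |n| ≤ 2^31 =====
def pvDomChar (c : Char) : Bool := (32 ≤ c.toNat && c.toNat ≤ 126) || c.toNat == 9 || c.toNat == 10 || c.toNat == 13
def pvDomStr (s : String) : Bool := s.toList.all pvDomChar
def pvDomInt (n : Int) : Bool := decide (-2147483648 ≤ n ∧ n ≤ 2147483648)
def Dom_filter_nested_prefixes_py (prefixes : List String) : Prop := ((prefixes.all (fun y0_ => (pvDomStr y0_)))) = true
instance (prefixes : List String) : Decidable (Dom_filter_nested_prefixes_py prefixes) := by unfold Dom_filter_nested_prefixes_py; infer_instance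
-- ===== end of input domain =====

-- B replaces A's quadratic pairwise scan by one hash-set of all '/'-terminated proper prefixes (objective: faster).

-- ===== PORT A =====
-- inner 'for existing in filtered' loop: scans `l` (a suffix of `full`); first branch sets
-- is_nested and breaks, second branch removes `existing` from the full list and breaks.
def scanA (p : String) (full : List String) : List String → Bool × List String
  | [] => (false, full)
  | e :: rest =>
    if PySem.Str.len p < PySem.Str.len e ∧ PySem.Chars.startswith e.toList (p.toList ++ ['/']) = true then
      (true, full)
    else if PySem.Str.len e < PySem.Str.len p ∧ PySem.Chars.startswith p.toList (e.toList ++ ['/']) = true then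
      -- list.remove cannot raise here: e is an element of full (getD is unreachable)
      (false, (PySem.List.remove? full e).getD full)
    else scanA p full rest

def filter_nested_prefixes_py (prefixes : List String) : List String :=
  if prefixes = [] then []
  else
    let sorted_prefixes := PySem.List.sorted prefixes (fun s => PySem.Str.len s) true
    let filtered := sorted_prefixes.foldl
      (fun filtered p =>
        let r := scanA p filtered filtered
        if r.1 then filtered else r.2 ++ [p]) []
    -- sorted(filtered): Python compares strings lexicographically by code point = List Char order
    PySem.List.sorted filtered (fun x => x.toList) false

-- ===== PORT B =====
-- cut = {q[:i] for q in prefixes for i, c in enumerate(q) if c == '/'}  (i ≥ 0, so q[:i] = take i)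
def cutSet (prefixes : List String) : PySem.Set (List Char) :=
  prefixes.foldl
    (fun s q =>
      (PySem.List.enumerate q.toList).foldl
        (fun s ic => if ic.2 = '/' then PySem.Set.add s (q.toList.take ic.1.toNat) else s) s)
    PySem.Set.empty

def filter_nested_prefixes_py_alt (prefixes : List String) : List String :=
  let cut := cutSet prefixes
  PySem.List.sorted (prefixes.filter (fun p => !(PySem.Set.contains cut p.toList))) (fun x => x.toList) false

-- ===== PRECONDITION & SPEC =====
def Spec_filter_nested_prefixes_py (prefixes : List String) (out : List String) : Prop := out = filter_nested_prefixes_py_alt prefixes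
instance (prefixes : List String) (out : List String) : Decidable (Spec_filter_nested_prefixes_py prefixes out) := by unfold Spec_filter_nested_prefixes_py; infer_instance

-- ===== CLAIM (what is proved, stated in full; the proofs are below) =====
def Claim_equal_filter_nested_prefixes_py : Prop := ∀ (prefixes : List String), Dom_filter_nested_prefixes_py prefixes → Spec_filter_nested_prefixes_py prefixes (filter_nested_prefixes_py prefixes)

-- ===== LEMMAS AND PROOFS =====

-- q is a strict '/'-extension of p
abbrev swP (q p : String) : Prop := (p.toList ++ ['/']) <+: q.toList

-- the keep-predicate both programs compute
def okd (prefixes : List String) (p : String) : Bool := decide (¬ ∃ q ∈ prefixes, swP q p)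

-- B-side: membership in the inner fold over enumerate
lemma innerAux (q : List Char) : ∀ (m n : Nat) (s : PySem.Set (List Char)) (x : List Char),
    q.length - n = m →
    (x ∈ (PySem.List.enumerate (q.drop n) (n : Int)).foldl
        (fun s ic => if ic.2 = '/' then PySem.Set.add s (q.take ic.1.toNat) else s) s
      ↔ x ∈ s ∨ ∃ i, n ≤ i ∧ ∃ h : i < q.length, q[i] = '/' ∧ x = q.take i) := by
  intro m
  induction m with
  | zero =>
    intro n s x hm
    have hdrop : q.drop n = [] := List.drop_eq_nil_iff.mpr (by omega)
    rw [hdrop]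
    simp only [PySem.List.enumerate, List.foldl_nil]
    constructor
    · exact Or.inl
    · rintro (hx | ⟨i, hni, hi, _⟩)
      · exact hx
      · omega
  | succ m ih =>
    intro n s x hm
    have hn : n < q.length := by omega
    rw [List.drop_eq_getElem_cons hn, PySem.List.enumerate_cons, List.foldl_cons]
    have hcast : (n : Int) + 1 = ((n + 1 : Nat) : Int) := by push_cast; ring
    rw [hcast, ih (n+1) _ x (by omega)]
    simp only [Int.toNat_natCast]
    by_cases hc : q[n] = '/'
    · rw [if_pos hc, PySem.Set.mem_add]
      constructor
      · rintro ((hx | rfl) | ⟨i, hni, hi, hci, rfl⟩)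
        · exact Or.inl hx
        · exact Or.inr ⟨n, le_rfl, hn, hc, rfl⟩
        · exact Or.inr ⟨i, by omega, hi, hci, rfl⟩
      · rintro (hx | ⟨i, hni, hi, hci, rfl⟩)
        · exact Or.inl (Or.inl hx)
        · by_cases hin : i = n
          · subst hin; exact Or.inl (Or.inr rfl)
          · exact Or.inr ⟨i, by omega, hi, hci, rfl⟩
    · rw [if_neg hc]
      constructor
      · rintro (hx | ⟨i, hni, hi, hci, rfl⟩)
        · exact Or.inl hx
        · exact Or.inr ⟨i, by omega, hi, hci, rfl⟩
      · rintro (hx | ⟨i, hni, hi, hci, rfl⟩)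
        · exact Or.inl hx
        · by_cases hin : i = n
          · subst hin; exact absurd hci hc
          · exact Or.inr ⟨i, by omega, hi, hci, rfl⟩

lemma outerAux : ∀ (l : List String) (s : PySem.Set (List Char)) (x : List Char),
    x ∈ l.foldl
      (fun s q =>
        (PySem.List.enumerate q.toList).foldl
          (fun s ic => if ic.2 = '/' then PySem.Set.add s (q.toList.take ic.1.toNat) else s) s) s
    ↔ x ∈ s ∨ ∃ q ∈ l, ∃ i, ∃ h : i < q.toList.length, q.toList[i] = '/' ∧ x = q.toList.take i := by
  intro l
  induction l with
  | nil => simp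
  | cons a t ih =>
    intro s x
    rw [List.foldl_cons, ih]
    have h0 : a.toList.drop 0 = a.toList := rfl
    have hinner := innerAux a.toList a.toList.length 0 s x (by omega)
    rw [h0] at hinner
    have h00 : ((0 : Nat) : Int) = (0 : Int) := rfl
    rw [h00] at hinner
    rw [hinner]
    constructor
    · rintro ((hx | ⟨i, _, hi, hci, rfl⟩) | ⟨q, hq, hrest⟩)
      · exact Or.inl hx
      · exact Or.inr ⟨a, by simp, i, hi, hci, rfl⟩
      · exact Or.inr ⟨q, by simp [hq], hrest⟩
    · rintro (hx | ⟨q, hq, hrest⟩)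
      · exact Or.inl (Or.inl hx)
      · rcases List.mem_cons.mp hq with rfl | hq
        · obtain ⟨i, hi, hci, rfl⟩ := hrest
          exact Or.inl (Or.inr ⟨i, by omega, hi, hci, rfl⟩)
        · exact Or.inr ⟨q, hq, hrest⟩

lemma cut_mem (prefixes : List String) (x : List Char) :
    x ∈ cutSet prefixes ↔ ∃ q ∈ prefixes, ∃ i, ∃ h : i < q.toList.length, q.toList[i] = '/' ∧ x = q.toList.take i := by
  rw [cutSet, outerAux]
  simp [PySem.Set.empty]

-- slash-prefix characterisation
lemma slash_prefix_iff (q p : List Char) :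
    (∃ i, ∃ h : i < q.length, q[i] = '/' ∧ p = q.take i) ↔ (p ++ ['/']) <+: q := by
  constructor
  · rintro ⟨i, h, hc, rfl⟩
    have ht : q.take i ++ ['/'] = q.take (i+1) := by
      rw [List.take_add_one]
      simp [List.getElem?_eq_getElem h, hc]
    rw [ht]
    exact List.take_prefix _ _
  · rintro ⟨l, hl⟩
    subst hl
    refine ⟨p.length, by simp, ?_, by simp⟩
    rw [List.getElem_append_left (by simp)]
    simp

lemma contains_cut_iff (prefixes : List String) (p : String) :
    PySem.Set.contains (cutSet prefixes) p.toList = true ↔ ∃ q ∈ prefixes, swP q p := by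
  rw [PySem.Set.contains_iff, cut_mem]
  exact exists_congr fun q => and_congr_right fun _ => slash_prefix_iff q.toList p.toList

-- length grows strictly along swP
lemma swP_len {q p : String} (h : swP q p) : p.toList.length < q.toList.length := by
  have := h.length_le
  simp only [List.length_append, List.length_cons, List.length_nil] at this
  omega

lemma swP_trans {r q p : String} (h1 : swP r q) (h2 : swP q p) : swP r p := by
  exact h2.trans ((List.prefix_append q.toList ['/']).trans h1)

lemma exists_max_len (l : List String) (hne : l ≠ []) :
    ∃ q ∈ l, ∀ r ∈ l, r.toList.length ≤ q.toList.length := by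
  induction l with
  | nil => simp at hne
  | cons a t ih =>
    cases t with
    | nil => exact ⟨a, by simp, by simp⟩
    | cons b t' =>
      obtain ⟨q, hq, hmax⟩ := ih (by simp)
      by_cases hle : a.toList.length ≤ q.toList.length
      · refine ⟨q, by simp [hq], ?_⟩
        intro r hr
        rcases List.mem_cons.mp hr with rfl | hr
        · exact hle
        · exact hmax r hr
      · refine ⟨a, by simp, ?_⟩
        intro r hr
        rcases List.mem_cons.mp hr with rfl | hr
        · exact le_rfl
        · exact le_trans (hmax r hr) (by omega)

-- absorption: any '/'-extension yields a kept '/'-extension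
lemma keyB (prefixes : List String) (p : String) (h : ∃ q ∈ prefixes, swP q p) :
    ∃ q ∈ prefixes, okd prefixes q = true ∧ swP q p := by
  classical
  set S := prefixes.filter (fun q => decide (swP q p)) with hS
  have hSne : S ≠ [] := by
    obtain ⟨q, hq, hsw⟩ := h
    intro hnil
    have : q ∈ S := by simp [hS, List.mem_filter, hq, hsw]
    simp [hnil] at this
  obtain ⟨q, hqS, hmax⟩ := exists_max_len S hSne
  have hq : q ∈ prefixes ∧ swP q p := by
    have := List.mem_filter.mp hqS
    simpa using this
  refine ⟨q, hq.1, ?_, hq.2⟩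
  simp only [okd, decide_eq_true_eq]
  rintro ⟨r, hr, hswr⟩
  have hrS : r ∈ S := by
    simp [hS, List.mem_filter, hr, swP_trans hswr hq.2]
  have := hmax r hrS
  have := swP_len hswr
  omega

-- A's first branch test is exactly swP (the length conjunct is implied by the prefix)
lemma testA_iff (e p : String) :
    (PySem.Str.len p < PySem.Str.len e ∧ PySem.Chars.startswith e.toList (p.toList ++ ['/']) = true) ↔ swP e p := by
  rw [PySem.Chars.startswith_iff]
  constructor
  · exact fun h => h.2
  · intro h
    refine ⟨?_, h⟩
    have := swP_len h
    simp only [PySem.Str.len_eq]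
    omega

-- A-side: the remove branch never fires when every scanned element is at least as long
lemma scanA_no_remove (p : String) (full : List String) : ∀ l : List String,
    (∀ e ∈ l, PySem.Str.len p ≤ PySem.Str.len e) →
    scanA p full l = (l.any (fun e => decide (swP e p)), full) := by
  intro l
  induction l with
  | nil => intro _; simp [scanA]
  | cons e rest ih =>
    intro hlen
    rw [scanA]
    by_cases h1 : swP e p
    · rw [if_pos ((testA_iff e p).mpr h1)]
      simp [h1]
    · rw [if_neg (fun hc => h1 ((testA_iff e p).mp hc))]
      rw [if_neg ?_]
      · rw [ih (fun x hx => hlen x (List.mem_cons_of_mem _ hx))]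
        simp [h1]
      · rintro ⟨hlt, _⟩
        have := hlen e (List.mem_cons_self)
        omega

-- the length-descending sort is pairwise length-descending
lemma sortedLen_pairwise (xs : List String) :
    (PySem.List.sorted xs (fun s => PySem.Str.len s) true).Pairwise
      (fun a b => PySem.Str.len b ≤ PySem.Str.len a) := by
  have heq : PySem.List.sorted xs (fun s => PySem.Str.len s) true
      = PySem.List.sorted xs (fun s => -PySem.Str.len s) false := by
    rw [PySem.List.sorted_rev_eq_foldl_insertBy, PySem.List.sorted_eq_foldl_insertBy]
    congr 1
    funext acc x
    congr 1
    funext a b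
    simp
  rw [heq]
  have := PySem.List.sorted_pairwise xs (fun s => -PySem.Str.len s)
  exact this.imp (fun h => by omega)

-- main loop invariant for A's fold
lemma foldA (prefixes : List String) :
    ∀ (L' P F : List String),
      PySem.List.sorted prefixes (fun s => PySem.Str.len s) true = P ++ L' →
      F = P.filter (okd prefixes) →
      L'.foldl (fun filtered p =>
          let r := scanA p filtered filtered
          if r.1 then filtered else r.2 ++ [p]) F
        = (P ++ L').filter (okd prefixes) := by
  intro L'
  induction L' with
  | nil => intro P F hL hF; simpa using hF
  | cons p rest ih =>
    intro P F hL hF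
    have hPW := sortedLen_pairwise prefixes
    rw [hL, List.pairwise_append] at hPW
    obtain ⟨hP, hpr, hcross⟩ := hPW
    have hrest : ∀ r ∈ rest, PySem.Str.len r ≤ PySem.Str.len p := (List.pairwise_cons.mp hpr).1
    have hFsub : ∀ e ∈ F, e ∈ P := by
      intro e he; rw [hF] at he; exact (List.mem_filter.mp he).1
    have hlenF : ∀ e ∈ F, PySem.Str.len p ≤ PySem.Str.len e := by
      intro e he
      exact hcross e (hFsub e he) p (List.mem_cons_self)
    rw [List.foldl_cons]
    have hmemP : ∀ q ∈ prefixes, PySem.Str.len p < PySem.Str.len q → q ∈ P := by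
      intro q hq hlt
      have hqm : q ∈ P ++ p :: rest := by
        rw [← hL]
        exact ((PySem.List.sorted_perm prefixes (fun s => PySem.Str.len s) true).mem_iff).mpr hq
      rcases List.mem_append.mp hqm with h | h
      · exact h
      · rcases List.mem_cons.mp h with rfl | h
        · omega
        · have := hrest q h; omega
    have hany : F.any (fun e => decide (swP e p)) = !(okd prefixes p) := by
      simp only [okd, decide_not, Bool.not_not]
      apply Bool.eq_iff_iff.mpr
      simp only [List.any_eq_true, decide_eq_true_eq]
      constructor
      · rintro ⟨e, he, hsw⟩
        have hep : e ∈ prefixes := by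
          have heL : e ∈ P ++ p :: rest := List.mem_append.mpr (Or.inl (hFsub e he))
          rw [← hL] at heL
          exact ((PySem.List.sorted_perm prefixes (fun s => PySem.Str.len s) true).mem_iff).mp heL
        exact ⟨e, hep, hsw⟩
      · intro h
        obtain ⟨q, hq, hok, hsw⟩ := keyB prefixes p h
        have hlen : PySem.Str.len p < PySem.Str.len q := by
          have := swP_len hsw
          simp only [PySem.Str.len_eq]
          omega
        refine ⟨q, ?_, hsw⟩
        rw [hF, List.mem_filter]
        exact ⟨hmemP q hq hlen, hok⟩
    have key : (let r := scanA p F F; if r.1 then F else r.2 ++ [p])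
        = (if okd prefixes p = true then F ++ [p] else F) := by
      rw [scanA_no_remove p F F hlenF, hany]
      cases h : okd prefixes p <;> simp
    rw [key]
    by_cases hok : okd prefixes p = true
    · rw [if_pos hok]
      have := ih (P ++ [p]) (F ++ [p]) (by rw [hL]; simp) (by rw [hF, List.filter_append]; simp [hok])
      rw [this]
      simp
    · have hokf : okd prefixes p = false := Bool.eq_false_iff.mpr hok
      rw [if_neg hok]
      have := ih (P ++ [p]) F (by rw [hL]; simp) (by rw [hF, List.filter_append]; simp [hokf])
      rw [this]
      simp

-- the final lexicographic sort is pairwise-sorted (bridging the LT instance on List Char)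
lemma sortedChars_pairwise (xs : List String) :
    (PySem.List.sorted xs (fun x : String => x.toList) false).Pairwise (fun a b => a.toList ≤ b.toList) := by
  have h := PySem.List.sorted_pairwise (κ := List Char) xs (fun x : String => x.toList)
  convert h using 2

-- B's filter predicate is the keep-predicate
lemma hpred (prefixes : List String) :
    (fun p => !(PySem.Set.contains (cutSet prefixes) p.toList)) = okd prefixes := by
  funext p
  apply Bool.eq_iff_iff.mpr
  rw [Bool.not_eq_true']
  simp only [okd, decide_eq_true_eq]
  rw [← Bool.not_eq_true, contains_cut_iff]

-- ===== VERDICT (by name: the statement is the Claim_ definition above) =====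
theorem filter_nested_prefixes_py_spec : Claim_equal_filter_nested_prefixes_py := by
  intro prefixes _
  unfold Spec_filter_nested_prefixes_py filter_nested_prefixes_py filter_nested_prefixes_py_alt
  by_cases hnil : prefixes = []
  · subst hnil
    rw [if_pos rfl]
    exact ((PySem.List.sorted_eq_nil_iff _ _ _).mpr rfl).symm
  · rw [if_neg hnil]
    have hfold := foldA prefixes (PySem.List.sorted prefixes (fun s => PySem.Str.len s) true) [] []
      (by simp) (by simp)
    simp only [List.nil_append] at hfold
    simp only []
    rw [hfold, hpred]
    apply PySem.List.eq_of_perm_of_pairwise_le_of_injective (key := fun x : String => x.toList)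
      (fun a b h => String.toList_injective h)
    · exact ((PySem.List.sorted_perm _ _ _).trans
        (((PySem.List.sorted_perm prefixes (fun s => PySem.Str.len s) true).filter _).trans
          (PySem.List.sorted_perm _ _ _).symm))
    · exact sortedChars_pairwise _
    · exact sortedChars_pairwise _
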